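-- pv_equiv track=rewrite | github.com/krzyssikora/advent_of_code | aoc_2017/21_fractal.py | cut_into_pieces
-- ===== SOURCE A (Python) =====
-- def cut_into_pieces(fractal, length, dim):
--     pieces = list()
--     for row in range(dim):
--         for column in range(dim):
--             piece = ""
--             for r in range(length):
--                 for c in range(length):
--                     piece += fractal[(length * row + r) * dim * length + (length * column + c)]
--             pieces.append(piece)
--     return pieces
-- ===== SOURCE B (Python) =====
-- def cut_into_pieces(fractal, length, dim):
--     width = dim * length
--     pieces = []
--     for tile_row in range(dim):
--         rows = [fractal[(tile_row * length + r) * width:(tile_row * length + r + 1) * width]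
--                 for r in range(length)]
--         for column in range(dim):
--             pieces.append("".join(row[column * length:(column + 1) * length] for row in rows))
--     return pieces
-- ===== Notes on version B (the rewrite author's own statement) =====
-- stated objective: faster
-- what changed: Replaces the four nested per-character loops with per-tile-row whole-row slicing: each grid row of the tile band is sliced out once and each piece is assembled by joining length-sized sub-slices, instead of indexing and concatenating one character at a time.
import Mathlib
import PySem

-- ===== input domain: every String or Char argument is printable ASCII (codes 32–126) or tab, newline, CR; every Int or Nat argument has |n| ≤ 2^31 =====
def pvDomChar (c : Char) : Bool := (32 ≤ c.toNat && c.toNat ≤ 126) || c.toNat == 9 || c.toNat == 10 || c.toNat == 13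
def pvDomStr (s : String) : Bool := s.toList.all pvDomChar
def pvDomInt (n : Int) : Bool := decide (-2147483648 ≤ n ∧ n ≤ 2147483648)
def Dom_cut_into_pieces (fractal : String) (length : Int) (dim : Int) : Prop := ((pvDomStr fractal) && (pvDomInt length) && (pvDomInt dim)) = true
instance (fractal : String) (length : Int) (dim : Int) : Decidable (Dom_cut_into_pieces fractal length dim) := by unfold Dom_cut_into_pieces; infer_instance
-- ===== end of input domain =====

-- B replaces A's four nested per-character loops by per-tile-row whole-row slicing and joins
-- (objective: faster by bulk slicing; measured constant-factor).


-- ===== PORT A =====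
def cut_into_pieces (fractal : String) (length : Int) (dim : Int) : List String :=
  let cs := fractal.toList
  (PySem.List.pyRange 0 dim 1).foldl (fun pieces row =>
    (PySem.List.pyRange 0 dim 1).foldl (fun pieces column =>
      let piece : List Char :=
        (PySem.List.pyRange 0 length 1).foldl (fun piece r =>
          (PySem.List.pyRange 0 length 1).foldl (fun piece c =>
            -- fractal[…]: in-range under Pre_ (the default is never read there)
            piece ++ [PySem.List.pyGetD cs ((length * row + r) * dim * length + (length * column + c)) ' ']) piece) []
      pieces ++ [String.ofList piece]) pieces) []

-- ===== PORT B =====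
def cut_into_pieces_alt (fractal : String) (length : Int) (dim : Int) : List String :=
  let width := dim * length
  let cs := fractal.toList
  (PySem.List.pyRange 0 dim 1).foldl (fun pieces tile_row =>
    let rows := (PySem.List.pyRange 0 length 1).map (fun r =>
      PySem.List.slice cs (some ((tile_row * length + r) * width)) (some ((tile_row * length + r + 1) * width)))
    (PySem.List.pyRange 0 dim 1).foldl (fun pieces column =>
      pieces ++ [String.ofList (rows.flatMap (fun row =>
        PySem.List.slice row (some (column * length)) (some ((column + 1) * length))))]) pieces) []

-- ===== PRECONDITION & SPEC =====
-- Pre_ excludes exactly the inputs where A raises IndexError: positive dims with a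
-- fractal shorter than (dim*length)^2 characters.
def Pre_cut_into_pieces (fractal : String) (length : Int) (dim : Int) : Prop :=
  (1 ≤ length ∧ 1 ≤ dim) → (dim * length) * (dim * length) ≤ (fractal.toList.length : Int)
instance (fractal : String) (length : Int) (dim : Int) : Decidable (Pre_cut_into_pieces fractal length dim) := by unfold Pre_cut_into_pieces; infer_instance
def pvWitness_cut_into_pieces : String × Int × Int := ("#..#", 2, 1)


def Spec_cut_into_pieces (fractal : String) (length : Int) (dim : Int) (out : List String) : Prop := out = cut_into_pieces_alt fractal length dim
instance (fractal : String) (length : Int) (dim : Int) (out : List String) : Decidable (Spec_cut_into_pieces fractal length dim out) := by unfold Spec_cut_into_pieces; infer_instance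

-- ===== CLAIM (what is proved, stated in full; the proofs are below) =====
def Claim_equal_cut_into_pieces : Prop := ∀ (fractal : String) (length : Int) (dim : Int), Dom_cut_into_pieces fractal length dim → Pre_cut_into_pieces fractal length dim → Spec_cut_into_pieces fractal length dim (cut_into_pieces fractal length dim)

-- ===== LEMMAS AND PROOFS =====

-- a row of length-L consecutive in-range character reads equals a drop/take chunk
lemma map_get_eq_take (cs : List Char) (a L : Int) (dflt : Char) (ha : 0 ≤ a)
    (h : a.toNat + L.toNat ≤ cs.length) :
    (PySem.List.pyRange 0 L 1).map (fun c => PySem.List.pyGetD cs (a + c) dflt)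
      = (cs.drop a.toNat).take L.toNat := by
  rw [PySem.List.pyRange_one]
  apply List.ext_getElem
  · simp
    omega
  · intro i h1 h2
    simp only [List.getElem_map, List.getElem_range, List.getElem_take, List.getElem_drop]
    rw [PySem.List.pyGetD_eq_getElem cs dflt (by simp at h1; omega) (by simp at h1; omega)]
    exact getElem_congr rfl (by omega) (by simp at h1; omega)

-- the per-(tile-row, grid-row, column) chunk: A's character loop = B's slice of a slice
lemma chunk_eq (cs : List Char) (l d row col r : Int)
    (hl : 1 ≤ l) (hrow : 0 ≤ row) (hcolL : 0 ≤ col) (hcolR : col < d)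
    (hrR : r < l) (hr : 0 ≤ r) (hrowR : row < d)
    (hn : (d * l) * (d * l) ≤ (cs.length : Int)) :
    (PySem.List.pyRange 0 l 1).map (fun c => PySem.List.pyGetD cs ((l * row + r) * d * l + (l * col + c)) ' ')
      = PySem.List.slice (PySem.List.slice cs (some ((row * l + r) * (d * l))) (some ((row * l + r + 1) * (d * l))))
          (some (col * l)) (some ((col + 1) * l)) := by
  obtain ⟨L, rfl⟩ := Int.eq_ofNat_of_zero_le (by omega : (0:ℤ) ≤ l)
  obtain ⟨D, rfl⟩ := Int.eq_ofNat_of_zero_le (by omega : (0:ℤ) ≤ d)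
  obtain ⟨R, rfl⟩ := Int.eq_ofNat_of_zero_le hrow
  obtain ⟨C, rfl⟩ := Int.eq_ofNat_of_zero_le hcolL
  obtain ⟨Rr, rfl⟩ := Int.eq_ofNat_of_zero_le hr
  -- Nat forms of the bounds
  have hL : 1 ≤ L := by exact_mod_cast hl
  have hR : R < D := by exact_mod_cast hrowR
  have hC : C < D := by exact_mod_cast hcolR
  have hRr : Rr < L := by exact_mod_cast hrR
  have hlen : (D * L) * (D * L) ≤ cs.length := by exact_mod_cast hn
  have hb1 : (R * L + Rr + 1) ≤ D * L := by
    calc R * L + Rr + 1 ≤ R * L + L := by omega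
    _ = (R + 1) * L := by ring
    _ ≤ D * L := Nat.mul_le_mul_right L hR
  have hb2 : C * L + L ≤ D * L := by
    calc C * L + L = (C + 1) * L := by ring
    _ ≤ D * L := Nat.mul_le_mul_right L hC
  have e1 : ((R:ℤ) * L + Rr) * ((D:ℤ) * L) = (((R * L + Rr) * (D * L) : ℕ) : ℤ) := by push_cast; ring
  have e2 : ((R:ℤ) * L + Rr + 1) * ((D:ℤ) * L) = (((R * L + Rr) * (D * L) : ℕ) : ℤ) + ((D * L : ℕ) : ℤ) := by push_cast; ring
  have e3 : ((C:ℤ)) * (L:ℤ) = ((C * L : ℕ) : ℤ) := by push_cast; ring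
  have e4 : ((C:ℤ) + 1) * (L:ℤ) = ((C * L : ℕ) : ℤ) + ((L : ℕ) : ℤ) := by push_cast; ring
  rw [e1, e2, PySem.List.slice_natCast_add, e3, e4, PySem.List.slice_natCast_add]
  have e5 : ∀ c : ℤ, ((L:ℤ) * R + Rr) * D * L + ((L:ℤ) * C + c)
      = (((R * L + Rr) * (D * L) + C * L : ℕ) : ℤ) + c := by intro c; push_cast; ring
  simp only [e5]
  rw [map_get_eq_take cs _ _ ' ' (by positivity)
    (by simp only [Int.toNat_natCast]
        calc (R * L + Rr) * (D * L) + C * L + L ≤ (R * L + Rr) * (D * L) + D * L := by omega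
        _ = (R * L + Rr + 1) * (D * L) := by ring
        _ ≤ (D * L) * (D * L) := Nat.mul_le_mul_right (D * L) hb1
        _ ≤ cs.length := hlen)]
  simp only [Int.toNat_natCast]
  rw [List.drop_take, List.take_take, List.drop_drop]
  congr 1
  omega

-- ===== VERDICT (by name: the statement is the Claim_ definition above) =====
theorem cut_into_pieces_spec : Claim_equal_cut_into_pieces := by
  intro fractal l d _hdom hpre
  unfold Spec_cut_into_pieces cut_into_pieces cut_into_pieces_alt
  simp only [PySem.List.foldl_append_singleton_eq_map, PySem.List.foldl_append_eq_flatMap,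
    List.nil_append]
  apply List.flatMap_congr
  intro row hrow
  apply List.map_congr_left
  intro col hcol
  rw [List.flatMap_map]
  congr 1
  apply List.flatMap_congr
  intro r hr
  obtain ⟨hrow0, hrowd⟩ := PySem.List.mem_pyRange_one.mp hrow
  obtain ⟨hcol0, hcold⟩ := PySem.List.mem_pyRange_one.mp hcol
  obtain ⟨hr0, hrl⟩ := PySem.List.mem_pyRange_one.mp hr
  exact chunk_eq fractal.toList l d row col r (by omega) hrow0 hcol0 hcold hrl hr0 hrowd
    (hpre ⟨by omega, by omega⟩)
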